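-- pv_equiv track=rewrite | github.com/ayushmishra90/Demo-Repo | Learning process/python/ASSG3_122CS0072_AYUSH/ASSG3_122CS0072_AYUSH_ 9.py | cubesum
-- ===== SOURCE A (Python) =====
-- def cubesum(a):
--     sum = 0
--     temp = a  # Store the original number in a temporary variable
--     while temp > 0:
--         digit = temp % 10
--         sum += digit ** 3
--         temp //= 10  # Use floor division to update temp
--     return sum
-- ===== SOURCE B (Python) =====
-- def cubesum(a):
--     if a <= 0:
--         return 0
--     return sum(int(d) ** 3 for d in str(a))
-- ===== Notes on version B (the rewrite author's own statement) =====
-- stated objective: idiomatic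
-- what changed: Replaces the div-mod digit-extraction loop with summing the cubes of the decimal-string digits of a (most-significant-first), guarding non-positive inputs where A's loop never runs and returns 0.
import Mathlib
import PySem

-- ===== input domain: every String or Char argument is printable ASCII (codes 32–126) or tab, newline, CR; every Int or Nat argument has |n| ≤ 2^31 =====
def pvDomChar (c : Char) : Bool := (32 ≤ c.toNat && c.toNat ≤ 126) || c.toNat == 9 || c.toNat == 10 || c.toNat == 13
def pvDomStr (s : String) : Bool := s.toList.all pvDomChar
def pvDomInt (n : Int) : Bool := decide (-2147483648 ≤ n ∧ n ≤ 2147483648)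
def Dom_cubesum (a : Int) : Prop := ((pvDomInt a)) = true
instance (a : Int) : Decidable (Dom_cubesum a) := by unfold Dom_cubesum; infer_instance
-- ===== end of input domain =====

-- B sums the cubes of the decimal-string digits most-significant-first instead of A's %10 // 10 loop; same value, idiomatic form.

-- ===== PORT A =====
-- the while loop of A: state (sum, temp)
def cubesumGo (sum temp : Int) : Int :=
  if h : temp > 0 then
    cubesumGo (sum + (PySem.Int.mod temp 10) ^ 3) (PySem.Int.floordiv temp 10)
  else
    sum
termination_by temp.toNat
decreasing_by
  have h1 : PySem.Int.floordiv temp 10 < temp := by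
    unfold PySem.Int.floordiv
    rw [Int.fdiv_eq_ediv]; simp
    omega
  omega

def cubesum (a : Int) : Int := cubesumGo 0 a

-- ===== PORT B =====
-- int(d) on a single decimal-digit character is exactly its code minus 48 (str(a) for a > 0 is digits only)
def cubesum_alt (a : Int) : Int :=
  if a ≤ 0 then 0
  else (PySem.Int.toChars a).foldl (fun acc c => acc + ((c.toNat : Int) - 48) ^ 3) 0

-- ===== PRECONDITION & SPEC =====
def Spec_cubesum (a : Int) (out : Int) : Prop := out = cubesum_alt a
instance (a : Int) (out : Int) : Decidable (Spec_cubesum a out) := by unfold Spec_cubesum; infer_instance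

-- ===== CLAIM (what is proved, stated in full; the proofs are below) =====
def Claim_equal_cubesum : Prop := ∀ (a : Int), Dom_cubesum a → Spec_cubesum a (cubesum a)

-- ===== LEMMAS AND PROOFS =====

-- sum of cubes of the base-10 digits of a natural number
def digitCubes (n : Nat) : Int :=
  if h : n = 0 then 0 else ((n % 10 : Nat) : Int) ^ 3 + digitCubes (n / 10)
termination_by n
decreasing_by exact Nat.div_lt_self (Nat.pos_of_ne_zero h) (by omega)

lemma fmod_ten (m : Nat) : PySem.Int.mod (m : Int) 10 = ((m % 10 : Nat) : Int) := by
  simp [PySem.Int.mod, Int.fmod_eq_emod]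

lemma fdiv_ten (m : Nat) : PySem.Int.floordiv (m : Int) 10 = ((m / 10 : Nat) : Int) := by
  unfold PySem.Int.floordiv
  rw [Int.fdiv_eq_ediv]; simp

lemma cubesumGo_natCast (n : Nat) (s : Int) : cubesumGo s (n : Int) = s + digitCubes n := by
  induction n using Nat.strong_induction_on generalizing s with
  | _ n ih =>
    rw [cubesumGo, digitCubes]
    by_cases h : n = 0
    · simp [h]
    · have hpos : (0 : Int) < (n : Int) := by exact_mod_cast Nat.pos_of_ne_zero h
      rw [dif_pos hpos, dif_neg h, fmod_ten, fdiv_ten,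
        ih (n / 10) (Nat.div_lt_self (Nat.pos_of_ne_zero h) (by omega))]
      ring

lemma digitChar_val (d : Nat) (hd : d < 10) :
    ((Nat.digitChar d).toNat : Int) - 48 = (d : Int) := by
  interval_cases d <;> decide

lemma foldl_toDigitsCore (f : Nat) : ∀ (n : Nat), n < f → ∀ (s : Int) (rest : List Char),
    (Nat.toDigitsCore 10 f n rest).foldl (fun acc c => acc + ((c.toNat : Int) - 48) ^ 3) s
      = rest.foldl (fun acc c => acc + ((c.toNat : Int) - 48) ^ 3) (s + digitCubes n) := by
  induction f with
  | zero => intro n hn; omega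
  | succ f ih =>
    intro n hn s rest
    rw [Nat.toDigitsCore]
    by_cases h : n / 10 = 0
    · rw [if_pos h]
      have hlt : n % 10 < 10 := Nat.mod_lt _ (by omega)
      simp only [List.foldl_cons, digitChar_val _ hlt]
      congr 1
      rw [digitCubes]
      by_cases h0 : n = 0
      · simp [h0]
      · rw [dif_neg h0, h, digitCubes]
        simp
    · rw [if_neg h]
      have hn0 : n ≠ 0 := by intro h0; simp [h0] at h
      have : n / 10 < f := by
        have := Nat.div_lt_self (Nat.pos_of_ne_zero hn0) (show 1 < 10 by omega)
        omega
      rw [ih (n / 10) this]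
      have hlt : n % 10 < 10 := Nat.mod_lt _ (by omega)
      simp only [List.foldl_cons, digitChar_val _ hlt]
      conv_rhs => rw [digitCubes]
      rw [dif_neg hn0]
      congr 1
      ring

-- ===== VERDICT (by name: the statement is the Claim_ definition above) =====
theorem cubesum_spec : Claim_equal_cubesum := by
  intro a _
  unfold Spec_cubesum cubesum cubesum_alt
  by_cases h : a ≤ 0
  · rw [if_pos h, cubesumGo, dif_neg (by omega)]
  · rw [if_neg h]
    have ha : a = ((a.toNat : Nat) : Int) := by omega
    rw [ha, cubesumGo_natCast, PySem.Int.toChars, if_neg (by omega), Int.toNat_natCast,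
      Nat.toDigits, foldl_toDigitsCore (a.toNat + 1) a.toNat (by omega)]
    simp
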